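-- pv_equiv track=rewrite | github.com/nbrucker/computerV1 | main.py | reduceForm
-- ===== SOURCE A (Python) =====
-- def expoCheck(tab, x):
--     i = 0
--     while (i < len(tab)):
--         if (tab[i] == x):
--             return i
--         i += 1
--     return -1
--
-- def reduceForm(before, after):
-- 	new = []
-- 	num = []
-- 	expo = []
-- 	i = 0
-- 	while (i < len(before[1])):
-- 		n = expoCheck(after[1], before[1][i])
-- 		if (n == -1):
-- 			num.append(before[0][i])
-- 		else:
-- 			num.append(before[0][i] - after[0][n])
-- 			del after[0][n]
-- 			del after[1][n]
-- 		expo.append(before[1][i])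
-- 		i += 1
-- 	i = 0
-- 	while (i < len(after[1])):
-- 		num.append(-after[0][i])
-- 		expo.append(after[1][i])
-- 		i += 1
-- 	new.append(num)
-- 	new.append(expo)
-- 	return new
-- ===== SOURCE B (Python) =====
-- def reduceForm(before, after):
--     # One-pass merge: dict mapping exponent -> FIFO queue of after-indices with a
--     # head cursor, plus a consumed mask, instead of A's scan-and-delete.
--     # Return value only: unlike A, this does not mutate `after` in place.
--     b0, b1 = before[0], before[1]
--     a0, a1 = after[0], after[1]
--     queues = {}
--     for j, e in enumerate(a1):
--         queues.setdefault(e, []).append(j)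
--     heads = {}
--     consumed = [False] * len(a1)
--     num = []
--     for i, e in enumerate(b1):
--         q = queues.get(e, [])
--         h = heads.get(e, 0)
--         if h < len(q):
--             j = q[h]
--             heads[e] = h + 1
--             consumed[j] = True
--             num.append(b0[i] - a0[j])
--         else:
--             num.append(b0[i])
--     expo = list(b1)
--     for j, e in enumerate(a1):
--         if not consumed[j]:
--             num.append(-a0[j])
--             expo.append(e)
--     return [num, expo]
-- ===== Notes on version B (the rewrite author's own statement) =====
-- stated objective: alternative
-- what changed: A matches each before-term by linearly scanning after[1] (expoCheck) and deleting the matched entry with del; B instead builds a dict mapping each exponent to a FIFO queue of after-indices once, pops a queue head per before-term via a cursor dict, marks consumed indices in a mask, and emits the leftovers in one final pass (intended as faster, O(n+m) vs O(n*m), but a timing run measured only 1.3x at the largest size, so no speed is claimed).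
import Mathlib
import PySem

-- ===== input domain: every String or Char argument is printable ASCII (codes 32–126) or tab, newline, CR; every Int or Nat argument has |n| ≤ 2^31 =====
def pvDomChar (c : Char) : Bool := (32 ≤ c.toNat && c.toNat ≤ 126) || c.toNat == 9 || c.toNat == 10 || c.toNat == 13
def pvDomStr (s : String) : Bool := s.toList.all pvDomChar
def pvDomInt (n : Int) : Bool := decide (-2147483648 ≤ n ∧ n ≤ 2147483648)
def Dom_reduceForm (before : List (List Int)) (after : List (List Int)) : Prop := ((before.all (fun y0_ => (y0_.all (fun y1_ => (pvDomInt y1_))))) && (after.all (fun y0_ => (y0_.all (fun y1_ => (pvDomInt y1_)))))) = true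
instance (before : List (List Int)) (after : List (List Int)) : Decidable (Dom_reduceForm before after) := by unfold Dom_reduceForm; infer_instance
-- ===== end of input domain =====

-- B replaces A's scan-and-delete merge by a dict of FIFO index queues plus a consumed
-- mask (one pass each over `before` and `after`); equivalence is about the RETURN value
-- only: Python A also mutates `after` in place, B does not.

-- ===== PORT A =====
-- while-loop of expoCheck: scan tab from index i upward, return first index holding x, else -1
def expoCheckAux (tab : List Int) (x : Int) (i : Int) : Int :=
  match tab with
  | [] => -1
  | t :: ts => if t = x then i else expoCheckAux ts x (i + 1)

def expoCheck (tab : List Int) (x : Int) : Int := expoCheckAux tab x 0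

-- one iteration of A's first while loop: state (num, expo, after0, after1), element (before1[i], i)
def stepA (b0 : List Int) (st : List Int × List Int × List Int × List Int) (p : Int × Nat) :
    List Int × List Int × List Int × List Int :=
  match st with
  | (num, expo, a0, a1) =>
    let n := expoCheck a1 p.1
    if n = -1 then
      (num ++ [b0.getD p.2 0], expo ++ [p.1], a0, a1)
    else
      (num ++ [b0.getD p.2 0 - a0.getD n.toNat 0], expo ++ [p.1],
       a0.eraseIdx n.toNat, a1.eraseIdx n.toNat)

def reduceForm (before : List (List Int)) (after : List (List Int)) : List (List Int) :=
  let b0 := (PySem.List.pyGet? before 0).getD []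
  let b1 := (PySem.List.pyGet? before 1).getD []
  let a0 := (PySem.List.pyGet? after 0).getD []
  let a1 := (PySem.List.pyGet? after 1).getD []
  -- first while loop (index i over before[1], deleting matched entries from after)
  let s := (b1.zipIdx).foldl (stepA b0) ([], [], a0, a1)
  -- second while loop (over what is left of after)
  let s2 := (s.2.2.2.zipIdx).foldl
      (fun (st : List Int × List Int) q => (st.1 ++ [-(s.2.2.1.getD q.2 0)], st.2 ++ [q.1]))
      (s.1, s.2.1)
  [s2.1, s2.2]

-- ===== PORT B =====
-- queues: exponent -> FIFO list of after-indices (setdefault(e, []).append(j))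
def buildQueues (a1 : List Int) : PySem.Dict Int (List Nat) :=
  (a1.zipIdx).foldl (fun d p => d.modify p.1 [] (· ++ [p.2])) PySem.Dict.empty

-- one iteration of B's merge loop: state (num, heads, consumed), element (before1[i], i)
def stepB (b0 a0 : List Int) (queues : PySem.Dict Int (List Nat))
    (st : List Int × PySem.Dict Int Nat × List Bool) (p : Int × Nat) :
    List Int × PySem.Dict Int Nat × List Bool :=
  match st with
  | (num, heads, consumed) =>
    let q := queues.getD p.1 []
    let h := heads.getD p.1 0
    if h < q.length then
      let j := q.getD h 0
      (num ++ [b0.getD p.2 0 - a0.getD j 0], heads.insert p.1 (h + 1), consumed.set j true)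
    else
      (num ++ [b0.getD p.2 0], heads, consumed)

def reduceForm_alt (before : List (List Int)) (after : List (List Int)) : List (List Int) :=
  let b0 := (PySem.List.pyGet? before 0).getD []
  let b1 := (PySem.List.pyGet? before 1).getD []
  let a0 := (PySem.List.pyGet? after 0).getD []
  let a1 := (PySem.List.pyGet? after 1).getD []
  let queues := buildQueues a1
  let s := (b1.zipIdx).foldl (stepB b0 a0 queues)
      ([], PySem.Dict.empty, List.replicate a1.length false)
  -- leftover pass over after, skipping consumed indices
  let s2 := (a1.zipIdx).foldl
      (fun (st : List Int × List Int) q =>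
        if s.2.2.getD q.2 false then st else (st.1 ++ [-(a0.getD q.2 0)], st.2 ++ [q.1]))
      (s.1, b1)
  [s2.1, s2.2]

-- ===== PRECONDITION & SPEC =====
-- Pre_ excludes exactly the inputs on which Python A raises IndexError: fewer than two rows
-- in `before` or `after`, or a coefficient row shorter than its exponent row.
def Pre_reduceForm (before : List (List Int)) (after : List (List Int)) : Prop :=
  2 ≤ before.length ∧ 2 ≤ after.length ∧
  (before.getD 1 []).length ≤ (before.getD 0 []).length ∧
  (after.getD 1 []).length ≤ (after.getD 0 []).length
instance (before : List (List Int)) (after : List (List Int)) : Decidable (Pre_reduceForm before after) := by unfold Pre_reduceForm; infer_instance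

def pvWitness_reduceForm : List (List Int) × List (List Int) := ([[5, 4, 1], [0, 1, 2]], [[3, 2], [1, 1]])

def Spec_reduceForm (before : List (List Int)) (after : List (List Int)) (out : List (List Int)) : Prop := out = reduceForm_alt before after
instance (before : List (List Int)) (after : List (List Int)) (out : List (List Int)) : Decidable (Spec_reduceForm before after out) := by unfold Spec_reduceForm; infer_instance

-- ===== CLAIM (what is proved, stated in full; the proofs are below) =====
def Claim_equal_reduceForm : Prop := ∀ (before : List (List Int)) (after : List (List Int)), Dom_reduceForm before after → Pre_reduceForm before after → Spec_reduceForm before after (reduceForm before after)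

-- ===== LEMMAS AND PROOFS =====

-- indices of `after` not yet consumed, in increasing order
def remIdx (m : Nat) (C : List Bool) : List Nat :=
  (List.range m).filter (fun j => !(C.getD j false))

-- B's queue/cursor state seen as the per-exponent filter of the unconsumed indices
def QInv (a1 : List Int) (queues : PySem.Dict Int (List Nat)) (heads : PySem.Dict Int Nat)
    (C : List Bool) : Prop :=
  ∀ e : Int, (queues.getD e []).drop (heads.getD e 0) =
    (remIdx a1.length C).filter (fun j => a1.getD j 0 == e)

theorem expoCheckAux_eq (tab : List Int) (x : Int) (i : Int) :
    expoCheckAux tab x i =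
      (match tab.findIdx? (fun t => t == x) with
       | some k => i + (k : Int)
       | none => -1) := by
  induction tab generalizing i with
  | nil => simp [expoCheckAux]
  | cons t ts ih =>
    rw [expoCheckAux, List.findIdx?_cons]
    by_cases h : t = x
    · simp [h]
    · simp only [beq_iff_eq, h, if_neg, if_false, ih]
      cases hf : ts.findIdx? (fun t => t == x) <;> simp [hf] <;> push_cast <;> ring

theorem zipIdx_eq_map_range (l : List Int) :
    l.zipIdx = (List.range l.length).map (fun j => (l.getD j 0, j)) := by
  apply List.ext_getElem
  · simp
  · intro i h1 h2
    simp at h1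
    simp [List.getElem_zipIdx, List.getElem?_eq_getElem h1]

theorem buildAux (e : Int) : ∀ (l : List Int) (k : Nat) (d : PySem.Dict Int (List Nat)),
    ((l.zipIdx k).foldl (fun d p => d.modify p.1 [] (· ++ [p.2])) d).getD e [] =
      d.getD e [] ++ ((l.zipIdx k).filter (fun p => p.1 == e)).map (·.2) := by
  intro l
  induction l with
  | nil => simp
  | cons x xs ih =>
    intro k d
    rw [List.zipIdx_cons, List.foldl_cons, ih, List.filter_cons]
    by_cases hx : x = e
    · simp only [hx, beq_self_eq_true, if_pos]
      rw [PySem.Dict.getD_modify_self]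
      simp
    · have : (x == e) = false := by simp [hx]
      simp only [this, if_neg, Bool.false_eq_true, if_false]
      rw [PySem.Dict.getD_modify_of_ne _ _ _ (fun hh => hx hh.symm)]

theorem buildQueues_getD (a1 : List Int) (e : Int) :
    (buildQueues a1).getD e [] =
      (List.range a1.length).filter (fun j => a1.getD j 0 == e) := by
  unfold buildQueues
  rw [buildAux, PySem.Dict.getD_empty, zipIdx_eq_map_range, List.filter_map, List.map_map]
  simp [Function.comp_def]

theorem first_match (P : Nat → Bool) (l : List Nat) (j : Nat) (rest : List Nat)
    (h : l.filter P = j :: rest) :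
    ∃ k : Nat, l.findIdx? P = some k ∧ k < l.length ∧ l.getD k 0 = j ∧
      (l.eraseIdx k).filter P = rest ∧
      ∀ Q : Nat → Bool, Q j = false → (l.eraseIdx k).filter Q = l.filter Q := by
  induction l generalizing j rest with
  | nil => simp at h
  | cons x xs ih =>
    by_cases hx : P x
    · rw [List.filter_cons_of_pos hx] at h
      injection h with h1 h2
      subst h1; subst h2
      refine ⟨0, by simp [List.findIdx?_cons, hx], by simp, rfl, by simp, ?_⟩
      intro Q hQ
      rw [List.eraseIdx_cons_zero, List.filter_cons_of_neg (by simp [hQ])]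
    · rw [List.filter_cons_of_neg hx] at h
      obtain ⟨k, h1, h2, h3, h4, h5⟩ := ih _ _ h
      refine ⟨k + 1, ?_, by simpa using h2, by simpa using h3, ?_, ?_⟩
      · rw [List.findIdx?_cons]
        simp [hx, h1]
      · rw [List.eraseIdx_cons_succ, List.filter_cons_of_neg hx]
        exact h4
      · intro Q hQ
        rw [List.eraseIdx_cons_succ, List.filter_cons, List.filter_cons]
        rw [h5 Q hQ]

theorem filter_ne_eq_eraseIdx (l : List Nat) (hl : l.Nodup) :
    ∀ (k : Nat) (hk : k < l.length), l.filter (fun i => !(i == l[k])) = l.eraseIdx k := by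
  induction l with
  | nil => intro k hk; simp at hk
  | cons x xs ih =>
    intro k hk
    match k with
    | 0 =>
      simp only [List.getElem_cons_zero, List.eraseIdx_cons_zero, List.filter_cons]
      simp only [beq_self_eq_true, Bool.not_true, Bool.false_eq_true, if_false]
      apply List.filter_eq_self.mpr
      intro a ha
      have hax : a ≠ x := fun hc => (List.nodup_cons.mp hl).1 (hc ▸ ha)
      simp [hax]
    | k + 1 =>
      simp only [List.getElem_cons_succ, List.eraseIdx_cons_succ, List.filter_cons]
      have hk' : k < xs.length := by simpa using hk
      have hxne : x ≠ xs[k] := by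
        intro hcontra
        exact (List.nodup_cons.mp hl).1 (hcontra ▸ xs.getElem_mem hk')
      rw [if_pos (by simp [hxne])]
      rw [ih (List.nodup_cons.mp hl).2 k hk']

theorem remIdx_set (m : Nat) (C : List Bool) (j k : Nat) (hC : C.length = m)
    (hk : k < (remIdx m C).length) (hj : (remIdx m C).getD k 0 = j) :
    remIdx m (C.set j true) = (remIdx m C).eraseIdx k := by
  have hnd : (remIdx m C).Nodup := List.Nodup.filter _ List.nodup_range
  have hjel : (remIdx m C)[k] = j := by rw [← List.getD_eq_getElem _ 0 hk, hj]
  have hjm : j ∈ remIdx m C := hjel ▸ List.getElem_mem hk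
  have hjlt : j < m := by
    have := List.mem_filter.mp hjm
    simpa using List.mem_range.mp this.1
  have step1 : remIdx m (C.set j true) = (remIdx m C).filter (fun i => !(i == j)) := by
    unfold remIdx
    rw [List.filter_filter]
    apply List.filter_congr
    intro i hi
    have him : i < m := List.mem_range.mp hi
    by_cases hij : i = j
    · subst hij
      simp [List.getD_eq_getElem?_getD, List.getElem?_set, hC ▸ hjlt]
    · simp [List.getD_eq_getElem?_getD, List.getElem?_set, Ne.symm hij, hij, Bool.and_comm]
  rw [step1, ← hjel, filter_ne_eq_eraseIdx _ hnd k hk]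

theorem step_corr (b0 a0 a1 : List Int) (queues : PySem.Dict Int (List Nat))
    (heads : PySem.Dict Int Nat) (C : List Bool) (num expo : List Int) (p : Int × Nat)
    (hC : C.length = a1.length) (hQ : QInv a1 queues heads C) :
    stepA b0 (num, expo, (remIdx a1.length C).map (fun j => a0.getD j 0) ++ a0.drop a1.length,
        (remIdx a1.length C).map (fun j => a1.getD j 0)) p =
      ((stepB b0 a0 queues (num, heads, C) p).1, expo ++ [p.1],
       (remIdx a1.length (stepB b0 a0 queues (num, heads, C) p).2.2).map (fun j => a0.getD j 0)
         ++ a0.drop a1.length,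
       (remIdx a1.length (stepB b0 a0 queues (num, heads, C) p).2.2).map (fun j => a1.getD j 0))
    ∧ (stepB b0 a0 queues (num, heads, C) p).2.2.length = a1.length
    ∧ QInv a1 queues (stepB b0 a0 queues (num, heads, C) p).2.1
        (stepB b0 a0 queues (num, heads, C) p).2.2 := by
  rcases p with ⟨e, ipos⟩
  have hQe := hQ e
  by_cases hlt : heads.getD e 0 < (queues.getD e []).length
  · -- match found
    have hdrop : (queues.getD e []).drop (heads.getD e 0) =
        (queues.getD e [])[heads.getD e 0] :: (queues.getD e []).drop (heads.getD e 0 + 1) :=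
      List.drop_eq_getElem_cons hlt
    set j0 := (queues.getD e [])[heads.getD e 0] with hj0
    have hfil : (remIdx a1.length C).filter (fun j => a1.getD j 0 == e) =
        j0 :: (queues.getD e []).drop (heads.getD e 0 + 1) := by rw [← hQe, hdrop]
    obtain ⟨k, hfind, hk, hgetD, h4, h5⟩ := first_match _ _ _ _ hfil
    have hPj0 : a1.getD j0 0 = e := by
      have hm : j0 ∈ (remIdx a1.length C).filter (fun j => a1.getD j 0 == e) := by
        rw [hfil]; simp
      simpa using (List.mem_filter.mp hm).2
    have hec : expoCheck ((remIdx a1.length C).map (fun j => a1.getD j 0)) e = (k : Int) := by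
      unfold expoCheck
      rw [expoCheckAux_eq, List.findIdx?_map]
      have hco : ((fun t => t == e) ∘ fun j => a1.getD j 0) = fun j => a1.getD j 0 == e := rfl
      rw [hco, hfind]
      simp
    have hkne : ¬((k : Int) = -1) := by omega
    have hrk : (remIdx a1.length C)[k] = j0 := by
      rw [← List.getD_eq_getElem _ 0 hk, hgetD]
    have hlen0 : k < ((remIdx a1.length C).map (fun j => a0.getD j 0)).length := by
      simpa using hk
    have hlen1 : k < ((remIdx a1.length C).map (fun j => a1.getD j 0)).length := by
      simpa using hk
    have hval : ((remIdx a1.length C).map (fun j => a0.getD j 0) ++ a0.drop a1.length).getD k 0 =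
        a0.getD j0 0 := by
      rw [List.getD_eq_getElem?_getD, List.getElem?_append_left hlen0, List.getElem?_map,
        List.getElem?_eq_getElem hk]
      simp [hrk]
    have hB : stepB b0 a0 queues (num, heads, C) (e, ipos) =
        (num ++ [b0.getD ipos 0 - a0.getD j0 0], heads.insert e (heads.getD e 0 + 1),
         C.set j0 true) := by
      simp only [stepB]
      rw [if_pos hlt, List.getD_eq_getElem _ _ hlt]
    have hrem' : remIdx a1.length (C.set j0 true) = (remIdx a1.length C).eraseIdx k :=
      remIdx_set _ _ _ _ hC hk hgetD
    have hA : stepA b0 (num, expo,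
        (remIdx a1.length C).map (fun j => a0.getD j 0) ++ a0.drop a1.length,
        (remIdx a1.length C).map (fun j => a1.getD j 0)) (e, ipos) =
        (num ++ [b0.getD ipos 0 - a0.getD j0 0], expo ++ [e],
         ((remIdx a1.length C).eraseIdx k).map (fun j => a0.getD j 0) ++ a0.drop a1.length,
         ((remIdx a1.length C).eraseIdx k).map (fun j => a1.getD j 0)) := by
      simp only [stepA, hec]
      rw [if_neg hkne]
      simp only [Int.toNat_natCast]
      rw [List.eraseIdx_append_of_lt_length hlen0, List.eraseIdx_map, List.eraseIdx_map]
      simp only [List.getD_eq_getElem?_getD] at hval ⊢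
      rw [hval]
    refine ⟨?_, ?_, ?_⟩
    · rw [hA, hB, hrem']
    · rw [hB]; simp [hC]
    · rw [hB]
      intro e'
      simp only
      rw [hrem', PySem.Dict.getD_insert]
      by_cases he' : e' = e
      · subst he'
        rw [if_pos rfl, h4]
      · have hQj0 : (fun j => a1.getD j 0 == e') j0 = false := by
          simp only [beq_eq_false_iff_ne]
          intro hcontra
          exact he' ((hPj0 ▸ hcontra).symm)
        rw [if_neg he', h5 _ hQj0, hQ e']
  · -- no match
    have hnil : (queues.getD e []).drop (heads.getD e 0) = [] :=
      List.drop_eq_nil_of_le (Nat.le_of_not_lt hlt)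
    have hfil : (remIdx a1.length C).filter (fun j => a1.getD j 0 == e) = [] := by
      rw [← hQe, hnil]
    have hec : expoCheck ((remIdx a1.length C).map (fun j => a1.getD j 0)) e = -1 := by
      unfold expoCheck
      rw [expoCheckAux_eq, List.findIdx?_map]
      have hnone : (remIdx a1.length C).findIdx? (fun j => a1.getD j 0 == e) = none := by
        rw [List.findIdx?_eq_none_iff]
        intro j hj
        simpa using List.filter_eq_nil_iff.mp hfil j hj
      rw [show ((fun t => t == e) ∘ fun j => a1.getD j 0) = fun j => a1.getD j 0 == e from rfl,
        hnone]
    have hB : stepB b0 a0 queues (num, heads, C) (e, ipos) =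
        (num ++ [b0.getD ipos 0], heads, C) := by
      simp only [stepB]
      rw [if_neg hlt]
    have hA : stepA b0 (num, expo,
        (remIdx a1.length C).map (fun j => a0.getD j 0) ++ a0.drop a1.length,
        (remIdx a1.length C).map (fun j => a1.getD j 0)) (e, ipos) =
        (num ++ [b0.getD ipos 0], expo ++ [e],
         (remIdx a1.length C).map (fun j => a0.getD j 0) ++ a0.drop a1.length,
         (remIdx a1.length C).map (fun j => a1.getD j 0)) := by
      simp only [stepA, hec]
      simp only [if_true]
    refine ⟨?_, ?_, ?_⟩
    · rw [hA, hB]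
    · rw [hB]; exact hC
    · rw [hB]; exact hQ

theorem loop1_corr (b0 a0 a1 : List Int) (queues : PySem.Dict Int (List Nat)) :
    ∀ (bl : List (Int × Nat)) (num expo : List Int) (heads : PySem.Dict Int Nat) (C : List Bool),
    C.length = a1.length → QInv a1 queues heads C →
    bl.foldl (stepA b0) (num, expo,
        (remIdx a1.length C).map (fun j => a0.getD j 0) ++ a0.drop a1.length,
        (remIdx a1.length C).map (fun j => a1.getD j 0)) =
      ((bl.foldl (stepB b0 a0 queues) (num, heads, C)).1, expo ++ bl.map (·.1),
       (remIdx a1.length (bl.foldl (stepB b0 a0 queues) (num, heads, C)).2.2).map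
         (fun j => a0.getD j 0) ++ a0.drop a1.length,
       (remIdx a1.length (bl.foldl (stepB b0 a0 queues) (num, heads, C)).2.2).map
         (fun j => a1.getD j 0)) := by
  intro bl
  induction bl with
  | nil => intro num expo heads C hC hQ; simp
  | cons p bl' ih =>
    intro num expo heads C hC hQ
    obtain ⟨hstep, hlen, hq⟩ := step_corr b0 a0 a1 queues heads C num expo p hC hQ
    rw [List.foldl_cons, List.foldl_cons, hstep,
      ih _ _ _ _ hlen hq]
    simp



theorem loop2A (a0v a1v : List Int) :
    ∀ (rem : List Nat) (off : Nat) (L : List Int) (st : List Int × List Int),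
    (∀ k, k < rem.length → L.getD (off + k) 0 = a0v.getD (rem.getD k 0) 0) →
    ((rem.map (fun j => a1v.getD j 0)).zipIdx off).foldl
        (fun (st : List Int × List Int) q => (st.1 ++ [-(L.getD q.2 0)], st.2 ++ [q.1])) st =
      rem.foldl (fun st j => (st.1 ++ [-(a0v.getD j 0)], st.2 ++ [a1v.getD j 0])) st := by
  intro rem
  induction rem with
  | nil => intro off L st h; simp
  | cons j rem' ih =>
    intro off L st h
    rw [List.map_cons, List.zipIdx_cons, List.foldl_cons, List.foldl_cons]
    have h0 : L.getD off 0 = a0v.getD j 0 := by simpa using h 0 (by simp)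
    rw [h0]
    apply ih (off + 1) L
    intro k hk
    have := h (k + 1) (by simpa using hk)
    simpa [Nat.add_assoc, Nat.add_comm 1 k] using this

theorem loop2B (a0v a1v : List Int) (C : List Bool) (st : List Int × List Int) :
    (a1v.zipIdx).foldl
        (fun (st : List Int × List Int) q =>
          if C.getD q.2 false then st else (st.1 ++ [-(a0v.getD q.2 0)], st.2 ++ [q.1])) st =
      (remIdx a1v.length C).foldl
        (fun st j => (st.1 ++ [-(a0v.getD j 0)], st.2 ++ [a1v.getD j 0])) st := by
  have hz : a1v.zipIdx = (List.range a1v.length).map (fun j => (a1v.getD j 0, j)) :=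
    zipIdx_eq_map_range a1v
  rw [hz, List.foldl_map]
  unfold remIdx
  rw [List.foldl_filter]
  congr 1
  funext x y
  by_cases hy : C.getD y false = true <;>
    simp only [List.getD_eq_getElem?_getD] at hy <;> simp [hy]

theorem map_getD_range (l : List Int) :
    (List.range l.length).map (fun j => l.getD j 0) = l := by
  apply List.ext_getElem
  · simp
  · intro i h1 h2
    simp at h2
    simp [List.getD_eq_getElem?_getD, List.getElem?_eq_getElem h2]

theorem map_getD_range_take (l : List Int) (m : Nat) (hm : m ≤ l.length) :
    (List.range m).map (fun j => l.getD j 0) = l.take m := by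
  apply List.ext_getElem
  · simp [Nat.min_eq_left hm]
  · intro i h1 h2
    simp at h1
    have hil : i < l.length := lt_of_lt_of_le h1 hm
    simp [List.getD_eq_getElem?_getD, List.getElem?_eq_getElem hil, List.getElem_take]

theorem remIdx_replicate (m : Nat) : remIdx m (List.replicate m false) = List.range m := by
  unfold remIdx
  apply List.filter_eq_self.mpr
  intro a ha
  simp [List.getD_replicate _ (List.mem_range.mp ha)]

-- ===== VERDICT (by name: the statement is the Claim_ definition above) =====
theorem reduceForm_spec : Claim_equal_reduceForm := by
  intro before after hdom hpre
  obtain ⟨h2b, h2a, hble, hale⟩ := hpre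
  have hb0 : PySem.List.pyGet? before 0 = some before[0] := by
    simpa using PySem.List.pyGet?_ofNat before 0 (by omega)
  have hb1 : PySem.List.pyGet? before 1 = some before[1] := by
    simpa using PySem.List.pyGet?_ofNat before 1 (by omega)
  have ha0 : PySem.List.pyGet? after 0 = some after[0] := by
    simpa using PySem.List.pyGet?_ofNat after 0 (by omega)
  have ha1 : PySem.List.pyGet? after 1 = some after[1] := by
    simpa using PySem.List.pyGet?_ofNat after 1 (by omega)
  have hgb1 : before.getD 1 [] = before[1] := List.getD_eq_getElem _ _ (by omega)
  have hgb0 : before.getD 0 [] = before[0] := List.getD_eq_getElem _ _ (by omega)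
  have hga1 : after.getD 1 [] = after[1] := List.getD_eq_getElem _ _ (by omega)
  have hga0 : after.getD 0 [] = after[0] := List.getD_eq_getElem _ _ (by omega)
  rw [hgb1, hgb0] at hble
  rw [hga1, hga0] at hale
  set b0 := before[0] with hsb0
  set b1 := before[1] with hsb1
  set a0 := after[0] with hsa0
  set a1 := after[1] with hsa1
  have hC0 : (List.replicate a1.length false).length = a1.length := by simp
  have hrem0 : remIdx a1.length (List.replicate a1.length false) = List.range a1.length :=
    remIdx_replicate a1.length
  have hQ0 : QInv a1 (buildQueues a1) PySem.Dict.empty (List.replicate a1.length false) := by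
    intro e
    rw [PySem.Dict.getD_empty, List.drop_zero, buildQueues_getD, hrem0]
  have hfold := loop1_corr b0 a0 a1 (buildQueues a1) b1.zipIdx [] [] PySem.Dict.empty
    (List.replicate a1.length false) hC0 hQ0
  rw [hrem0, map_getD_range_take a0 a1.length hale, List.take_append_drop,
    map_getD_range a1] at hfold
  have hfst : b1.zipIdx.map (·.1) = b1 := by
    rw [zipIdx_eq_map_range, List.map_map]
    exact map_getD_range b1
  rw [hfst] at hfold
  show reduceForm before after = reduceForm_alt before after
  unfold reduceForm reduceForm_alt
  simp only [hb0, hb1, ha0, ha1, Option.getD_some, ← hsb0, ← hsb1]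
  rw [hfold]
  set C' := (b1.zipIdx.foldl (stepB b0 a0 (buildQueues a1)) ([], PySem.Dict.empty,
    List.replicate a1.length false)).2.2 with hC'
  set numF := (b1.zipIdx.foldl (stepB b0 a0 (buildQueues a1)) ([], PySem.Dict.empty,
    List.replicate a1.length false)).1 with hnumF
  have hA2 := loop2A a0 a1 (remIdx a1.length C') 0
    ((remIdx a1.length C').map (fun j => a0.getD j 0) ++ a0.drop a1.length) (numF, [] ++ b1) ?_
  · rw [hA2, loop2B a0 a1 C' (numF, b1)]
    simp
  · intro k hk
    have hk0 : k < ((remIdx a1.length C').map (fun j => a0.getD j 0)).length := by simpa using hk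
    simp only [Nat.zero_add]
    rw [List.getD_eq_getElem?_getD, List.getElem?_append_left hk0, List.getElem?_map,
      List.getElem?_eq_getElem hk, List.getD_eq_getElem _ _ hk]
    simp
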